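-- pv_equiv track=rewrite | github.com/daaibraanies/go_game_ai | GO game/new_sly_player.py | upper_bound_area
-- ===== SOURCE A (Python) =====
-- def upper_bound_area(path):
--     area = set()
--     for vertex in path:
--         vrow, vcol = vertex
--         upper_row = vrow - 1
--         while upper_row >= 0:
--             if (upper_row, vcol) not in path:
--                 area.add((upper_row, vcol))
--             upper_row -= 1
--     return area
-- ===== SOURCE B (Python) =====
-- def upper_bound_area(path):
--     cells = set(path)
--     max_seen = {}          # column -> largest row processed so far in that column
--     area = set()
--     for vrow, vcol in path:
--         m = max_seen.get(vcol, 0)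
--         if vrow > m:
--             # only the rows not already covered by earlier vertices of this column
--             for row in range(vrow - 1, m - 1, -1):
--                 if (row, vcol) not in cells:
--                     area.add((row, vcol))
--             max_seen[vcol] = vrow
--     return area
-- ===== Notes on version B (the rewrite author's own statement) =====
-- stated objective: alternative
-- what changed: B keeps a dict of the running maximum row per column plus a precomputed set of path cells, so each vertex scans only the rows not yet covered by earlier vertices of its column, instead of A's full downward rescan to row 0 for every vertex.
import Mathlib
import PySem

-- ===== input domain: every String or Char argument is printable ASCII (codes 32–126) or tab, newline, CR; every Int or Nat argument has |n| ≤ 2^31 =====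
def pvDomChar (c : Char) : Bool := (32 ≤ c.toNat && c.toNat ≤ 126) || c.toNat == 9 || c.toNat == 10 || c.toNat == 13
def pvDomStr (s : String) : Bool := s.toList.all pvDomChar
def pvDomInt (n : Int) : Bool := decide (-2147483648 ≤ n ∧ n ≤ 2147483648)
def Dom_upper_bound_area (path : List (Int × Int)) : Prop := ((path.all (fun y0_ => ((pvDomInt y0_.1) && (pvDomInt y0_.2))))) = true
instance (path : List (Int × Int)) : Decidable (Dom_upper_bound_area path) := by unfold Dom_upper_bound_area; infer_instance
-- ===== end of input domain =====

-- B replaces A's per-vertex full downward rescan by one pass keeping a dict of the running maximum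
-- row per column and a precomputed set of path cells, so each vertex scans only the rows not yet
-- covered in its column (alternative decomposition; same return value, a set, on every input).

-- ===== PORT A =====
-- the inner 'while upper_row >= 0' loop of A
def ubWhileA (path : List (Int × Int)) (vcol : Int) (area : PySem.Set (Int × Int))
    (upper_row : Int) : PySem.Set (Int × Int) :=
  if 0 ≤ upper_row then
    ubWhileA path vcol
      (if (upper_row, vcol) ∈ path then area else PySem.Set.add area (upper_row, vcol))
      (upper_row - 1)
  else area
termination_by (upper_row + 1).toNat
decreasing_by omega

def upper_bound_area (path : List (Int × Int)) : List (Int × Int) :=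
  path.foldl (fun area vertex => ubWhileA path vertex.2 area (vertex.1 - 1)) PySem.Set.empty

-- ===== PORT B =====
def upper_bound_area_alt (path : List (Int × Int)) : List (Int × Int) :=
  let cells := PySem.Set.ofList path
  (path.foldl
    (fun (st : PySem.Dict Int Int × PySem.Set (Int × Int)) vertex =>
      let m := st.1.getD vertex.2 0
      if vertex.1 > m then
        (st.1.insert vertex.2 vertex.1,
         (PySem.List.pyRange (vertex.1 - 1) (m - 1) (-1)).foldl
           (fun area row =>
             if (row, vertex.2) ∈ cells then area else PySem.Set.add area (row, vertex.2))
           st.2)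
      else st)
    (PySem.Dict.empty, PySem.Set.empty)).2

-- ===== PRECONDITION & SPEC =====
def Spec_upper_bound_area (path : List (Int × Int)) (out : List (Int × Int)) : Prop := out = upper_bound_area_alt path
instance (path : List (Int × Int)) (out : List (Int × Int)) : Decidable (Spec_upper_bound_area path out) := by unfold Spec_upper_bound_area; infer_instance

-- ===== CLAIM (what is proved, stated in full; the proofs are below) =====
def Claim_equal_upper_bound_area : Prop := ∀ (path : List (Int × Int)), Dom_upper_bound_area path → Spec_upper_bound_area path (upper_bound_area path)

-- ===== LEMMAS AND PROOFS =====

-- one iteration of A's inner loop, as a step function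
def ubStep (path : List (Int × Int)) (vcol : Int) (area : PySem.Set (Int × Int))
    (row : Int) : PySem.Set (Int × Int) :=
  if (row, vcol) ∈ path then area else PySem.Set.add area (row, vcol)

-- B's fold step, with the precomputed set of path cells inlined
def bStep (path : List (Int × Int)) (st : PySem.Dict Int Int × PySem.Set (Int × Int))
    (vertex : Int × Int) : PySem.Dict Int Int × PySem.Set (Int × Int) :=
  let m := st.1.getD vertex.2 0
  if vertex.1 > m then
    (st.1.insert vertex.2 vertex.1,
     (PySem.List.pyRange (vertex.1 - 1) (m - 1) (-1)).foldl
       (fun area row =>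
         if (row, vertex.2) ∈ PySem.Set.ofList path then area
         else PySem.Set.add area (row, vertex.2))
       st.2)
  else st

theorem alt_eq_bStep (path : List (Int × Int)) :
    upper_bound_area_alt path =
      (path.foldl (bStep path) (PySem.Dict.empty, PySem.Set.empty)).2 := rfl

theorem ubWhileA_pos (path : List (Int × Int)) (vcol : Int) (area : PySem.Set (Int × Int))
    (u : Int) (h : 0 ≤ u) :
    ubWhileA path vcol area u = ubWhileA path vcol (ubStep path vcol area u) (u - 1) := by
  rw [ubWhileA]; simp [h, ubStep]

theorem ubWhileA_neg (path : List (Int × Int)) (vcol : Int) (area : PySem.Set (Int × Int))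
    (u : Int) (h : ¬ 0 ≤ u) : ubWhileA path vcol area u = area := by
  rw [ubWhileA]; simp [h]

theorem mem_ubStep_of_mem (path : List (Int × Int)) (vcol : Int)
    (area : PySem.Set (Int × Int)) (row : Int) (x : Int × Int) (hx : x ∈ area) :
    x ∈ ubStep path vcol area row := by
  unfold ubStep
  split
  · exact hx
  · exact (PySem.Set.mem_add _ _ _).mpr (Or.inl hx)

-- if every scanned row is already in the path or in the set, A's inner loop is a no-op
theorem ubWhileA_noop (path : List (Int × Int)) (vcol : Int) :
    ∀ (n : Nat) (u : Int) (area : PySem.Set (Int × Int)), (u + 1).toNat ≤ n →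
      (∀ i : Int, 0 ≤ i → i ≤ u → ((i, vcol) ∈ path ∨ (i, vcol) ∈ area)) →
      ubWhileA path vcol area u = area := by
  intro n
  induction n with
  | zero =>
    intro u area hn _
    exact ubWhileA_neg path vcol area u (by omega)
  | succ n ih =>
    intro u area hn hcov
    by_cases hu : 0 ≤ u
    · rw [ubWhileA_pos path vcol area u hu]
      have hstep : ubStep path vcol area u = area := by
        unfold ubStep
        rcases hcov u hu le_rfl with hp | ha
        · simp [hp]
        · split
          · rfl
          · exact PySem.Set.add_of_mem ha
      rw [hstep]
      exact ih (u - 1) area (by omega) (fun i h0 hle => hcov i h0 (by omega))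
    · exact ubWhileA_neg path vcol area u hu

-- A's inner loop down to 0 equals the fold over only the fresh rows u, u-1, …, m,
-- provided all rows below m are already covered
theorem ubWhileA_split (path : List (Int × Int)) (vcol : Int) :
    ∀ (n : Nat) (u m : Int) (area : PySem.Set (Int × Int)),
      (u - (m - 1)).toNat ≤ n → 0 ≤ m → m - 1 ≤ u →
      (∀ i : Int, 0 ≤ i → i ≤ m - 1 → ((i, vcol) ∈ path ∨ (i, vcol) ∈ area)) →
      ubWhileA path vcol area u
        = (PySem.List.pyRange u (m - 1) (-1)).foldl (ubStep path vcol) area := by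
  intro n
  induction n with
  | zero =>
    intro u m area hn hm hmu hcov
    have hu : u = m - 1 := by omega
    subst hu
    rw [PySem.List.pyRange_neg_one_eq_nil le_rfl]
    exact ubWhileA_noop path vcol ((m - 1) + 1).toNat (m - 1) area le_rfl hcov
  | succ n ih =>
    intro u m area hn hm hmu hcov
    by_cases heq : u ≤ m - 1
    · have hu : u = m - 1 := by omega
      subst hu
      rw [PySem.List.pyRange_neg_one_eq_nil le_rfl]
      exact ubWhileA_noop path vcol ((m - 1) + 1).toNat (m - 1) area le_rfl hcov
    · have hlt : m - 1 < u := by omega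
      rw [PySem.List.pyRange_neg_one_cons hlt, List.foldl_cons,
        ubWhileA_pos path vcol area u (by omega)]
      exact ih (u - 1) m (ubStep path vcol area u) (by omega) hm (by omega)
        (fun i h0 hle => (hcov i h0 hle).imp id (mem_ubStep_of_mem path vcol area u _))

theorem mem_foldl_ubStep_of_mem (path : List (Int × Int)) (vcol : Int) :
    ∀ (l : List Int) (area : PySem.Set (Int × Int)) (x : Int × Int), x ∈ area →
      x ∈ l.foldl (ubStep path vcol) area := by
  intro l
  induction l with
  | nil => exact fun area x hx => hx
  | cons r l ih =>
    intro area x hx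
    exact ih _ x (mem_ubStep_of_mem path vcol area r x hx)

theorem covered_foldl_ubStep (path : List (Int × Int)) (vcol : Int) :
    ∀ (l : List Int) (area : PySem.Set (Int × Int)) (i : Int), i ∈ l →
      ((i, vcol) ∈ path ∨ (i, vcol) ∈ l.foldl (ubStep path vcol) area) := by
  intro l
  induction l with
  | nil => intro area i hi; cases hi
  | cons r l ih =>
    intro area i hi
    rcases List.mem_cons.mp hi with hi | hi
    · subst hi
      by_cases hp : (i, vcol) ∈ path
      · exact Or.inl hp
      · refine Or.inr (mem_foldl_ubStep_of_mem path vcol l _ _ ?_)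
        unfold ubStep
        simp only [hp]
        exact (PySem.Set.mem_add _ _ _).mpr (Or.inr rfl)
    · exact ih _ i hi

-- B's fresh-row fold is A's step fold (set membership = list membership)
theorem bFold_eq_ubStep (path : List (Int × Int)) (vcol : Int) (l : List Int)
    (area : PySem.Set (Int × Int)) :
    l.foldl (fun area row =>
        if (row, vcol) ∈ PySem.Set.ofList path then area
        else PySem.Set.add area (row, vcol)) area
      = l.foldl (ubStep path vcol) area := by
  simp only [PySem.Set.mem_ofList]
  rfl

-- main invariant: from any pair of states related by "every cell below the recorded
-- column maximum is in the path or already collected", the two folds collect the same list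
theorem main_inv (path : List (Int × Int)) :
    ∀ (rest : List (Int × Int)) (d : PySem.Dict Int Int) (area : PySem.Set (Int × Int)),
      (∀ c : Int, 0 ≤ d.getD c 0) →
      (∀ (c i : Int), 0 ≤ i → i < d.getD c 0 → ((i, c) ∈ path ∨ (i, c) ∈ area)) →
      rest.foldl (fun area vertex => ubWhileA path vertex.2 area (vertex.1 - 1)) area
        = (rest.foldl (bStep path) (d, area)).2 := by
  intro rest
  induction rest with
  | nil => intro d area _ _; rfl
  | cons v rest ih =>
    intro d area hnn hcov
    by_cases hgt : v.1 > d.getD v.2 0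
    · have hA : ubWhileA path v.2 area (v.1 - 1)
          = (PySem.List.pyRange (v.1 - 1) (d.getD v.2 0 - 1) (-1)).foldl
              (ubStep path v.2) area :=
        ubWhileA_split path v.2 (v.1 - 1 - (d.getD v.2 0 - 1)).toNat (v.1 - 1)
          (d.getD v.2 0) area le_rfl (hnn v.2) (by omega)
          (fun i h0 hle => hcov v.2 i h0 (by omega))
      have hB : bStep path (d, area) v
          = (d.insert v.2 v.1,
             (PySem.List.pyRange (v.1 - 1) (d.getD v.2 0 - 1) (-1)).foldl
               (ubStep path v.2) area) := by
        unfold bStep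
        simp only [hgt, if_pos]
        rw [bFold_eq_ubStep]
      rw [List.foldl_cons, List.foldl_cons, hA, hB]
      apply ih
      · intro c
        by_cases hc : c = v.2
        · subst hc
          rw [PySem.Dict.getD_insert, if_pos rfl]
          have := hnn v.2
          omega
        · rw [PySem.Dict.getD_insert, if_neg hc]
          exact hnn c
      · intro c i h0 hlt
        by_cases hc : c = v.2
        · subst hc
          rw [PySem.Dict.getD_insert, if_pos rfl] at hlt
          by_cases hlow : i < d.getD v.2 0
          · exact (hcov v.2 i h0 hlow).imp id
              (mem_foldl_ubStep_of_mem path v.2 _ area (i, v.2))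
          · refine covered_foldl_ubStep path v.2 _ area i ?_
            exact (PySem.List.mem_pyRange_neg_one).mpr ⟨by omega, by omega⟩
        · rw [PySem.Dict.getD_insert, if_neg hc] at hlt
          exact (hcov c i h0 hlt).imp id
            (mem_foldl_ubStep_of_mem path v.2 _ area (i, c))
    · have hA : ubWhileA path v.2 area (v.1 - 1) = area :=
        ubWhileA_noop path v.2 (v.1 - 1 + 1).toNat (v.1 - 1) area le_rfl
          (fun i h0 hle => hcov v.2 i h0 (by omega))
      have hB : bStep path (d, area) v = (d, area) := by
        unfold bStep
        simp only [hgt, if_neg, not_false_iff]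
      rw [List.foldl_cons, List.foldl_cons, hA, hB]
      exact ih d area hnn hcov

-- ===== VERDICT (by name: the statement is the Claim_ definition above) =====
theorem upper_bound_area_spec : Claim_equal_upper_bound_area := by
  intro path _
  unfold Spec_upper_bound_area upper_bound_area
  rw [alt_eq_bStep]
  exact main_inv path path PySem.Dict.empty PySem.Set.empty
    (fun c => by simp [PySem.Dict.getD_empty])
    (fun c i h0 hlt => by simp [PySem.Dict.getD_empty] at hlt; omega)
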